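-- pv_equiv track=rewrite | github.com/BekirBz/invoice-ai-mvp | backend/main.py | pick_vendor
-- ===== SOURCE A (Python) =====
-- from typing import List, Optional, Dict, Any
--
-- def pick_vendor(text: str) -> Optional[str]:
--     for line in text.splitlines():
--         line = line.strip()
--         if not line:
--             continue
--         if any(w in line.lower() for w in ["ltd", "limited", "inc", "gmbh", "company", "co."]):
--             return line
--     for line in text.splitlines():
--         if line.strip():
--             return line.strip()
--     return None
-- ===== SOURCE B (Python) =====
-- KEYWORDS = ("ltd", "limited", "inc", "gmbh", "company", "co.")
--
-- def pick_vendor(text):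
--     first = None
--     for line in text.splitlines():
--         line = line.strip()
--         if not line:
--             continue
--         if first is None:
--             first = line
--         low = line.lower()
--         if any(w in low for w in KEYWORDS):
--             return line
--     return first
-- ===== Notes on version B (the rewrite author's own statement) =====
-- stated objective: simpler
-- what changed: B replaces A's two separate scans over text.splitlines() (keyword scan, then fallback scan) by one single pass that remembers the first nonempty stripped line as a fallback and returns immediately on a keyword hit.
import Mathlib
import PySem

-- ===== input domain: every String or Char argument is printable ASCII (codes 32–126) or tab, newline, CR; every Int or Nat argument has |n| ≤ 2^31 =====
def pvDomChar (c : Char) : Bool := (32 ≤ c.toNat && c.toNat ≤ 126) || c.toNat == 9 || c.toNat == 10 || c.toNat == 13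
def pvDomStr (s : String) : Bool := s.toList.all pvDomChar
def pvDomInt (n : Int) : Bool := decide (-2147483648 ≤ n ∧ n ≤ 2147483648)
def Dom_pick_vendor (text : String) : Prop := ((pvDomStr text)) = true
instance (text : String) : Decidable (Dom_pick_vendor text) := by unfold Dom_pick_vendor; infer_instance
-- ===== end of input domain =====

-- B merges A's two scans over the split lines into one pass with a fallback accumulator (objective: simpler).

-- ===== PORT A =====
def pvKeywordsA : List String := ["ltd", "limited", "inc", "gmbh", "company", "co."]

-- first loop of A: return the first nonempty stripped line containing a keyword
def pvLoop1 : List String → Option String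
  | [] => none
  | l :: rest =>
    let s := PySem.Str.strip l
    if s = "" then pvLoop1 rest
    else if pvKeywordsA.any (fun w => PySem.Str.isIn w (PySem.Str.lower s)) then some s
    else pvLoop1 rest

-- second loop of A: return the first nonempty stripped line
def pvLoop2 : List String → Option String
  | [] => none
  | l :: rest =>
    if PySem.Str.strip l = "" then pvLoop2 rest else some (PySem.Str.strip l)

def pick_vendor (text : String) : Option String :=
  match pvLoop1 (PySem.Str.splitlines text) with
  | some r => some r
  | none => pvLoop2 (PySem.Str.splitlines text)

-- ===== PORT B =====
def pvKeywordsB : List String := ["ltd", "limited", "inc", "gmbh", "company", "co."]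

-- single pass: `first` remembers the first nonempty stripped line; keyword hit returns immediately
def pvLoopB : List String → Option String → Option String
  | [], first => first
  | l :: rest, first =>
    let s := PySem.Str.strip l
    if s = "" then pvLoopB rest first
    else
      let first' := match first with | none => some s | some f => some f
      if pvKeywordsB.any (fun w => PySem.Str.isIn w (PySem.Str.lower s)) then some s
      else pvLoopB rest first'

def pick_vendor_alt (text : String) : Option String :=
  pvLoopB (PySem.Str.splitlines text) none

-- ===== PRECONDITION & SPEC =====
def Spec_pick_vendor (text : String) (out : Option String) : Prop := out = pick_vendor_alt text
instance (text : String) (out : Option String) : Decidable (Spec_pick_vendor text out) := by unfold Spec_pick_vendor; infer_instance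

-- ===== CLAIM (what is proved, stated in full; the proofs are below) =====
def Claim_equal_pick_vendor : Prop := ∀ (text : String), Dom_pick_vendor text → Spec_pick_vendor text (pick_vendor text)

-- ===== LEMMAS AND PROOFS =====

lemma pvLoopB_eq (ls : List String) : ∀ first : Option String,
    pvLoopB ls first =
      match pvLoop1 ls, first with
      | some r, _ => some r
      | none, some f => some f
      | none, none => pvLoop2 ls := by
  induction ls with
  | nil => intro first; cases first <;> simp [pvLoopB, pvLoop1, pvLoop2]
  | cons l rest ih =>
    intro first
    simp only [pvLoopB, pvLoop1, pvLoop2, pvKeywordsA, pvKeywordsB]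
    split_ifs with h1 h2
    · rw [ih]
    · cases first <;> simp
    · cases first <;> · rw [ih]; cases pvLoop1 rest <;> simp

-- ===== VERDICT (by name: the statement is the Claim_ definition above) =====
theorem pick_vendor_spec : Claim_equal_pick_vendor := by
  intro text _
  unfold Spec_pick_vendor pick_vendor pick_vendor_alt
  rw [pvLoopB_eq]
  cases pvLoop1 (PySem.Str.splitlines text) <;> simp
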